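-- pv_equiv track=rewrite | github.com/rachelmisty/HW_Software_Sp | homework_week4_FOR_STUDENT.py | binary_search_matrix
-- ===== SOURCE A (Python) =====
-- def binary_search_matrix(matrix, target):
--     result = []
--     row = 0
--     for i in matrix:
--         low = 0
--         high = len(i) - 1
--         mid = 0
--
--         while low <= high:
--             mid = (high + low) // 2 #this line gets the middle index of the array
--
--             # If the target value is greater, this code means ignore left half
--             if i[mid] < target:
--                 low = mid + 1
--
--             # If the target value is smaller, ignore right half
--             elif i[mid] > target:
--                 high = mid - 1
--
--             # means the target value is present at middle index
--             else:
--                 result.append(row)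
--                 result.append(mid)
--                 return result
--         row += 1
--
--     return [-1,-1]
-- ===== SOURCE B (Python) =====
-- def binary_search_matrix(matrix, target):
--     # slice-based binary search: no low/high indices, works on sublists;
--     # correct vs A because (low+high)//2 == low + (L-1)//2 for a segment of length L
--     def search(sub, base):
--         if not sub:
--             return None
--         k = (len(sub) - 1) // 2
--         v = sub[k]
--         if v == target:
--             return base + k
--         if v > target:
--             return search(sub[:k], base)
--         return search(sub[k + 1:], base + k + 1)
--
--     for r, row in enumerate(matrix):
--         j = search(row, 0)
--         if j is not None:
--             return [r, j]
--     return [-1, -1]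
-- ===== Notes on version B (the rewrite author's own statement) =====
-- stated objective: alternative
-- what changed: A's iterative while-loop binary search over low/high indices into the row (mutable state, manual row counter, appending to a shared result list) is replaced by a slice-based recursive search(sub, base) that carries no indices at all: it probes the middle element (len(sub)-1)//2 of the current sublist and recurses on sub[:k] or sub[k+1:] with an offset accumulator, driven by enumerate over the rows; identical values because (low+high)//2 == low + (L-1)//2 for a segment of length L.
import Mathlib
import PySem

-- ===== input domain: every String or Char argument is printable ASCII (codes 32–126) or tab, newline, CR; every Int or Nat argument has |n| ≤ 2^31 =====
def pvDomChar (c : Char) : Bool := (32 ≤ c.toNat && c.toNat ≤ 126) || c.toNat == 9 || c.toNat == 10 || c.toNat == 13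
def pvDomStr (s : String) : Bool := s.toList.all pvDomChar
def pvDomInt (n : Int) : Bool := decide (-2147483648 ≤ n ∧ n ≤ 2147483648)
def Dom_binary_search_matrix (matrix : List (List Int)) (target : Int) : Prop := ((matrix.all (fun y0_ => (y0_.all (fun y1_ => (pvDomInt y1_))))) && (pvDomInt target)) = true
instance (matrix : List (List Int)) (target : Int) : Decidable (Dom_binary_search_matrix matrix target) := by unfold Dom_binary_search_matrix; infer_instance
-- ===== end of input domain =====

-- B replaces A's iterative low/high-index binary search (mutable state, manual row counter,
-- shared result list) by a slice-based recursive search carrying an offset, driven by enumerate;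
-- same values because (low+high)//2 = low + (L-1)//2 for a segment of length L.

-- ===== PORT A =====
-- A's inner `while low <= high` loop over one row: `some mid` models the early `return result`
-- (result = [] with row and mid appended), `none` models falling out of the loop.
-- The `pyGet? … | none` arm is a totality guard only: inside the loop 0 ≤ low ≤ mid ≤ high < len i.
def pvLoopA (i : List Int) (target low high : Int) : Option Int :=
  if h : low ≤ high then
    let mid := PySem.Int.floordiv (high + low) 2
    match PySem.List.pyGet? i mid with
    | none => none
    | some v =>
      if v < target then pvLoopA i target (mid + 1) high
      else if v > target then pvLoopA i target low (mid - 1)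
      else some mid
  else none
termination_by (high - low + 1).toNat
decreasing_by
  · have hb := PySem.Int.floordiv_two_mid_bounds h
    rw [Int.add_comm low high] at hb
    omega
  · have hb := PySem.Int.floordiv_two_mid_bounds h
    rw [Int.add_comm low high] at hb
    omega

-- A's `for i in matrix` loop with the running `row` counter.
def pvRowsA (target row : Int) (m : List (List Int)) : List Int :=
  match m with
  | [] => [-1, -1]
  | i :: rest =>
    match pvLoopA i target 0 ((i.length : Int) - 1) with
    | some mid => [row, mid]
    | none => pvRowsA target (row + 1) rest

def binary_search_matrix (matrix : List (List Int)) (target : Int) : List Int :=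
  pvRowsA target 0 matrix

-- ===== PORT B =====
-- B's slice-based search(sub, base): probes sub[(len(sub)-1)//2], recurses on sub[:k] / sub[k+1:]
-- (slices with 0 ≤ k < len sub, so List.take/List.drop are exact); None = not found.
def pvSearch (t : Int) (sub : List Int) (base : Int) : Option Int :=
  if hs : sub.length = 0 then none
  else
    let k := (sub.length - 1) / 2
    match sub[k]? with
    | none => none
    | some v =>
      if v = t then some (base + (k : Int))
      else if v > t then pvSearch t (sub.take k) base
      else pvSearch t (sub.drop (k + 1)) (base + (k : Int) + 1)
termination_by sub.length
decreasing_by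
  · simp only [List.length_take]; omega
  · simp only [List.length_drop]; omega

-- B's `for r, row in enumerate(matrix)` loop.
def pvScanB (t : Int) (rows : List (Int × List Int)) : List Int :=
  match rows with
  | [] => [-1, -1]
  | (r, row) :: rest =>
    match pvSearch t row 0 with
    | some j => [r, j]
    | none => pvScanB t rest

def binary_search_matrix_alt (matrix : List (List Int)) (target : Int) : List Int :=
  pvScanB target (PySem.List.enumerate matrix 0)

-- ===== PRECONDITION & SPEC =====
def Spec_binary_search_matrix (matrix : List (List Int)) (target : Int) (out : List Int) : Prop := out = binary_search_matrix_alt matrix target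
instance (matrix : List (List Int)) (target : Int) (out : List Int) : Decidable (Spec_binary_search_matrix matrix target out) := by unfold Spec_binary_search_matrix; infer_instance

-- ===== CLAIM =====
def Claim_equal_binary_search_matrix : Prop := ∀ (matrix : List (List Int)) (target : Int), Dom_binary_search_matrix matrix target → Spec_binary_search_matrix matrix target (binary_search_matrix matrix target)

-- ===== LEMMAS AND PROOFS =====

-- A's loop on arr over [low, high] equals B's search on the slice arr[low : high+1] with offset low.
lemma pvLoop_eq_search (arr : List Int) (t : Int) :
    ∀ (n : Nat) (low high : Int), (high - low + 1).toNat ≤ n → 0 ≤ low →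
      high < (arr.length : Int) →
      pvLoopA arr t low high =
        pvSearch t ((arr.drop low.toNat).take (high - low + 1).toNat) low := by
  intro n
  induction n with
  | zero =>
    intro low high hn hlow hhigh
    have hgt : ¬ low ≤ high := by omega
    rw [pvLoopA, pvSearch]
    simp [hgt, show (high - low + 1).toNat = 0 by omega]
  | succ n ih =>
    intro low high hn hlow hhigh
    by_cases hle : low ≤ high
    · set Ln : Nat := (high - low + 1).toNat with hLn
      have hLn1 : 1 ≤ Ln := by omega
      set sub := (arr.drop low.toNat).take Ln with hsub
      have hsublen : sub.length = Ln := by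
        simp [hsub, List.length_take, List.length_drop]
        omega
      set k : Nat := (Ln - 1) / 2 with hk
      have hkLn : k < Ln := by omega
      have hmid : PySem.Int.floordiv (high + low) 2 = low + (k : Int) := by
        rw [PySem.Int.floordiv_eq_ediv_of_pos (by norm_num)]
        omega
      have hidx : low.toNat + k < arr.length := by omega
      have hsubk : sub[k]? = some arr[low.toNat + k] := by
        rw [hsub, List.getElem?_take_of_lt (by omega), List.getElem?_drop,
          List.getElem?_eq_getElem hidx]
      have hix : (low + (k : Int)).toNat = low.toNat + k := by omega
      have hget : PySem.List.pyGet? arr (low + (k : Int)) = some arr[low.toNat + k] := by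
        have h1 := PySem.List.pyGet?_eq_some_getElem (xs := arr) (i := low + (k : Int))
          (by omega) (by omega)
        rw [h1]
        simp [hix]
      rw [pvLoopA, pvSearch]
      simp only [hle, dif_pos, hsublen, show ¬ Ln = 0 by omega, dif_neg, not_false_iff,
        hmid, hget, ← hk, hsubk]
      by_cases hlt : arr[low.toNat + k] < t
      · simp only [hlt, if_pos, show ¬ arr[low.toNat + k] = t by omega, if_neg,
          show ¬ arr[low.toNat + k] > t by omega, not_false_iff]
        have hrec := ih (low + (k : Int) + 1) high (by omega) (by omega) hhigh
        have h1 : (high - (low + (k : Int) + 1) + 1).toNat = Ln - (k + 1) := by omega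
        have h2 : (low + (k : Int) + 1).toNat = low.toNat + (k + 1) := by omega
        rw [hrec, h1, h2, hsub, List.drop_take, List.drop_drop]
      · by_cases hgt : arr[low.toNat + k] > t
        · simp only [hlt, if_neg, show ¬ arr[low.toNat + k] = t by omega, hgt, if_pos,
            not_false_iff]
          have hrec := ih low (low + (k : Int) - 1) (by omega) hlow (by omega)
          have h1 : (low + (k : Int) - 1 - low + 1).toNat = k := by omega
          rw [hrec, h1, hsub, List.take_take, min_eq_left hkLn.le]
        · have heq : arr[low.toNat + k] = t := by omega
          simp [heq]
    · rw [pvLoopA, pvSearch]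
      simp [hle, show (high - low + 1).toNat = 0 by omega]

lemma pvRows_eq_scan (t : Int) :
    ∀ (m : List (List Int)) (r : Int),
      pvRowsA t r m = pvScanB t (PySem.List.enumerate m r) := by
  intro m
  induction m with
  | nil => intro r; simp [pvRowsA, PySem.List.enumerate_nil, pvScanB]
  | cons i rest ih =>
    intro r
    rw [PySem.List.enumerate_cons, pvRowsA, pvScanB]
    have h := pvLoop_eq_search i t (((i.length : Int) - 1 - 0 + 1).toNat) 0
      ((i.length : Int) - 1) (le_refl _) (le_refl 0) (by omega)
    have hfull : ((i.drop (0 : Int).toNat).take ((i.length : Int) - 1 - 0 + 1).toNat) = i := by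
      simp
    rw [hfull] at h
    rw [h]
    cases pvSearch t i 0 with
    | none => simp [ih]
    | some j => simp

-- ===== VERDICT =====
theorem binary_search_matrix_spec : Claim_equal_binary_search_matrix := by
  intro matrix target _
  unfold Spec_binary_search_matrix binary_search_matrix binary_search_matrix_alt
  exact pvRows_eq_scan target matrix 0
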